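-- pv_equiv track=rewrite | github.com/godinghunak/envault | envault/env_group.py | group_by_custom
-- ===== SOURCE A (Python) =====
-- from collections import defaultdict
-- from typing import Dict, List, Optional, Tuple
--
-- def group_by_custom(env: Dict[str, str], rules: List[Tuple[str, List[str]]]) -> Dict[str, Dict[str, str]]:
--     """Group env vars by custom rules: list of (group_name, [key_prefixes]).
--
--     Keys not matching any rule land in '_OTHER'.
--     """
--     groups: Dict[str, Dict[str, str]] = defaultdict(dict)
--     assigned: set = set()
--
--     for group_name, prefixes in rules:
--         for key, value in env.items():
--             if any(key.startswith(p) for p in prefixes):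
--                 groups[group_name][key] = value
--                 assigned.add(key)
--
--     for key, value in env.items():
--         if key not in assigned:
--             groups["_OTHER"][key] = value
--
--     return dict(groups)
-- ===== SOURCE B (Python) =====
-- def group_by_custom(env, rules):
--     """Group env vars by custom rules: list of (group_name, [key_prefixes]).
--
--     Keys not matching any rule land in '_OTHER'.
--     Inverted strategy: index every rule prefix once (prefix -> rule indices),
--     then one walk over each key's own prefixes finds all matching rules.
--     """
--     prefix_map = {}
--     for ri, (_name, prefixes) in enumerate(rules):
--         for p in prefixes:
--             prefix_map.setdefault(p, set()).add(ri)
--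
--     empty = frozenset()
--     hits = {}
--     for key in env:
--         s = set()
--         for i in range(len(key) + 1):
--             s |= prefix_map.get(key[:i], empty)
--         hits[key] = s
--
--     groups = {}
--     for ri, (group_name, _prefixes) in enumerate(rules):
--         for key, value in env.items():
--             if ri in hits[key]:
--                 groups.setdefault(group_name, {})[key] = value
--     for key, value in env.items():
--         if not hits[key]:
--             groups.setdefault("_OTHER", {})[key] = value
--     return groups
-- ===== Notes on version B (the rewrite author's own statement) =====
-- stated objective: faster
-- what changed: Instead of re-scanning env once per rule and testing every prefix of every rule against every key (any(startswith)), B builds a one-shot index prefix->rule-indices, computes each key's matching rule set by one walk over the key's own prefixes, and then emits groups in rule order using only set-membership/emptiness tests.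
import Mathlib
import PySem

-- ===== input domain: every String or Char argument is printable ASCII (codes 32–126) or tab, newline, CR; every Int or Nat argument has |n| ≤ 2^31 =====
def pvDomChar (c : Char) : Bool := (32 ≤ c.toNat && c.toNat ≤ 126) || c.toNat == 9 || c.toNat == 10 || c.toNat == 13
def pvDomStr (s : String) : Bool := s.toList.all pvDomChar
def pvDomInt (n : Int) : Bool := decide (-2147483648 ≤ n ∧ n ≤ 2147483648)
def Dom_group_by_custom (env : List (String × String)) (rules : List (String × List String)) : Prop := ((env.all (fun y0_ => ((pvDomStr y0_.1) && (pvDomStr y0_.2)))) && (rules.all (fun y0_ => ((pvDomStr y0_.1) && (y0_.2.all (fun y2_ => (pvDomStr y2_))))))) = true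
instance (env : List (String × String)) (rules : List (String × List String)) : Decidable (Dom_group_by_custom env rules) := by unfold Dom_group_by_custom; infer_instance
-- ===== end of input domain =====

-- B replaces A's rule-by-rule rescans of env (any(startswith) per rule × key) by a one-shot
-- index of all rule prefixes (prefix → rule indices) plus one walk over each key's own
-- prefixes; objective: faster (a timing run measured B ≥15x faster at the largest sizes).

-- ===== PORT A =====
-- 'groups[group_name][key] = value' on a defaultdict(dict) is exactly
-- Dict.modify group_name empty (fun d => d.insert key value).
def group_by_custom (env : List (String × String)) (rules : List (String × List String)) : List (String × List (String × String)) :=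
  let st := rules.foldl
    (fun (st : PySem.Dict String (PySem.Dict String String) × PySem.Set String) r =>
      env.foldl (fun st kv =>
        if r.2.any (fun p => PySem.Str.startswith kv.1 p) then
          (st.1.modify r.1 PySem.Dict.empty (fun d => d.insert kv.1 kv.2), st.2.add kv.1)
        else st) st)
    (PySem.Dict.empty, PySem.Set.empty)
  let groups := env.foldl (fun g kv =>
    if st.2.contains kv.1 then g
    else g.modify "_OTHER" PySem.Dict.empty (fun d => d.insert kv.1 kv.2)) st.1
  groups.items.map (fun p => (p.1, p.2.items))

-- ===== PORT B =====
-- 'prefix_map.setdefault(p, set()).add(ri)' mutates the set stored at p in place: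
-- exactly Dict.modify p Set.empty (fun s => s.add ri).
def pvPrefixMap (rules : List (String × List String)) : PySem.Dict String (PySem.Set Int) :=
  (PySem.List.enumerate rules).foldl
    (fun m rp => rp.2.2.foldl (fun m p => m.modify p PySem.Set.empty (fun s => s.add rp.1)) m)
    PySem.Dict.empty

-- one walk over key's own prefixes key[:i], i = 0..len(key)
def pvHits (pm : PySem.Dict String (PySem.Set Int)) (key : String) : PySem.Set Int :=
  (PySem.List.pyRange 0 (PySem.Str.len key + 1) 1).foldl
    (fun s i => s.union (pm.getD (PySem.Str.slice key none (some i)) PySem.Set.empty))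
    PySem.Set.empty

-- 'groups.setdefault(name, {})[key] = value' mutates the dict stored at name in place:
-- exactly Dict.modify name Dict.empty (fun d => d.insert key value).
def group_by_custom_alt (env : List (String × String)) (rules : List (String × List String)) : List (String × List (String × String)) :=
  let pm := pvPrefixMap rules
  let hits : PySem.Dict String (PySem.Set Int) :=
    env.foldl (fun h kv => h.insert kv.1 (pvHits pm kv.1)) PySem.Dict.empty
  let groups := (PySem.List.enumerate rules).foldl
    (fun g rp =>
      env.foldl (fun (g : PySem.Dict String (PySem.Dict String String)) kv =>
        if (hits.getD kv.1 PySem.Set.empty).contains rp.1 then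
          g.modify rp.2.1 PySem.Dict.empty (fun d => d.insert kv.1 kv.2)
        else g) g)
    PySem.Dict.empty
  let groups := env.foldl (fun g kv =>
    if (hits.getD kv.1 PySem.Set.empty).isEmpty then
      g.modify "_OTHER" PySem.Dict.empty (fun d => d.insert kv.1 kv.2)
    else g) groups
  groups.items.map (fun p => (p.1, p.2.items))

-- ===== PRECONDITION & SPEC =====
def Spec_group_by_custom (env : List (String × String)) (rules : List (String × List String)) (out : List (String × List (String × String))) : Prop := out = group_by_custom_alt env rules
instance (env : List (String × String)) (rules : List (String × List String)) (out : List (String × List (String × String))) : Decidable (Spec_group_by_custom env rules out) := by unfold Spec_group_by_custom; infer_instance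

-- ===== CLAIM (what is proved, stated in full; the proofs are below) =====
def Claim_equal_group_by_custom : Prop := ∀ (env : List (String × String)) (rules : List (String × List String)), Dom_group_by_custom env rules → Spec_group_by_custom env rules (group_by_custom env rules)


-- ===== LEMMAS AND PROOFS =====

-- A's match test for one rule and one key
def pvM (r : String × List String) (k : String) : Bool :=
  r.2.any (fun p => PySem.Str.startswith k p)

-- membership in the set stored at q after registering one rule's prefixes
theorem pv_mem_prefixFold (ps : List String) (m : PySem.Dict String (PySem.Set Int))
    (ri : Int) (q : String) (x : Int) :
    x ∈ (ps.foldl (fun m p => m.modify p PySem.Set.empty (fun s => s.add ri)) m).getD q PySem.Set.empty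
      ↔ x ∈ m.getD q PySem.Set.empty ∨ (x = ri ∧ q ∈ ps) := by
  induction ps generalizing m with
  | nil => simp
  | cons p ps ih =>
    simp only [List.foldl_cons, ih, PySem.Dict.getD_modify, List.mem_cons]
    by_cases h : q = p
    · subst h; simp [PySem.Set.mem_add]; tauto
    · simp [h]

-- membership in prefix_map's set at q, general start index and accumulator
theorem pv_mem_pmFold (rs : List (String × List String)) (s : Int)
    (m : PySem.Dict String (PySem.Set Int)) (q : String) (x : Int) :
    x ∈ ((PySem.List.enumerate rs s).foldl
          (fun m rp => rp.2.2.foldl (fun m p => m.modify p PySem.Set.empty (fun s => s.add rp.1)) m) m).getD q PySem.Set.empty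
      ↔ x ∈ m.getD q PySem.Set.empty ∨ ∃ j : Nat, ∃ h : j < rs.length, x = s + j ∧ q ∈ rs[j].2 := by
  induction rs generalizing s m with
  | nil => simp [PySem.List.enumerate_nil]
  | cons r rs ih =>
    rw [PySem.List.enumerate_cons]
    simp only [List.foldl_cons, ih, pv_mem_prefixFold]
    constructor
    · rintro ((hm | ⟨rfl, hq⟩) | ⟨j, hj, rfl, hq⟩)
      · exact Or.inl hm
      · refine Or.inr ⟨0, ?_, ?_, ?_⟩
        · simp
        · simp
        · simpa using hq
      · refine Or.inr ⟨j + 1, ?_, ?_, ?_⟩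
        · simpa using hj
        · push_cast; ring
        · simpa using hq
    · rintro (hm | ⟨j, hj, rfl, hq⟩)
      · exact Or.inl (Or.inl hm)
      · cases j with
        | zero => exact Or.inl (Or.inr ⟨by simp, by simpa using hq⟩)
        | succ j => exact Or.inr ⟨j, by simpa using hj, by push_cast; ring, by simpa using hq⟩

theorem pv_mem_pm (rules : List (String × List String)) (q : String) (x : Int) :
    x ∈ (pvPrefixMap rules).getD q PySem.Set.empty
      ↔ ∃ j : Nat, ∃ h : j < rules.length, x = (j : Int) ∧ q ∈ rules[j].2 := by
  unfold pvPrefixMap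
  rw [pv_mem_pmFold]
  simp [PySem.Dict.getD_empty]

-- membership in a fold of set unions
theorem pv_mem_unionFold (l : List Int) (f : Int → PySem.Set Int) (s0 : PySem.Set Int) (x : Int) :
    x ∈ l.foldl (fun s i => s.union (f i)) s0 ↔ x ∈ s0 ∨ ∃ i ∈ l, x ∈ f i := by
  induction l generalizing s0 with
  | nil => simp
  | cons i l ih =>
    simp only [List.foldl_cons, ih, PySem.Set.mem_union, List.mem_cons]
    constructor
    · rintro ((h | h) | ⟨i', hi', h⟩)
      · exact Or.inl h
      · exact Or.inr ⟨i, Or.inl rfl, h⟩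
      · exact Or.inr ⟨i', Or.inr hi', h⟩
    · rintro (h | ⟨i', (rfl | hi'), h⟩)
      · exact Or.inl (Or.inl h)
      · exact Or.inl (Or.inr h)
      · exact Or.inr ⟨i', hi', h⟩

-- the key characterisation: ri is hit for key iff rule ri matches key the way A tests it
theorem pv_mem_hits (rules : List (String × List String)) (key : String) (x : Int) :
    x ∈ pvHits (pvPrefixMap rules) key
      ↔ ∃ j : Nat, ∃ h : j < rules.length, x = (j : Int) ∧ pvM rules[j] key = true := by
  unfold pvHits
  rw [pv_mem_unionFold]
  simp only [PySem.List.mem_pyRange_one]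
  constructor
  · rintro (hemp | ⟨i, ⟨hi0, hilt⟩, hmem⟩)
    · exact absurd hemp (by simp [PySem.Set.empty])
    · rw [pv_mem_pm] at hmem
      obtain ⟨j, hj, rfl, hq⟩ := hmem
      refine ⟨j, hj, rfl, ?_⟩
      unfold pvM
      rw [List.any_eq_true]
      refine ⟨_, hq, ?_⟩
      rw [PySem.Str.startswith_eq, PySem.Chars.startswith_iff]
      have hsl : (PySem.Str.slice key none (some i)).toList = key.toList.take i.toNat := by
        simp [PySem.Str.slice, PySem.List.slice_to _ hi0]
      rw [hsl]
      exact List.take_prefix _ _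
  · rintro ⟨j, hj, rfl, hM⟩
    unfold pvM at hM
    rw [List.any_eq_true] at hM
    obtain ⟨p, hp, hsw⟩ := hM
    rw [PySem.Str.startswith_eq, PySem.Chars.startswith_iff] at hsw
    refine Or.inr ⟨(p.toList.length : Int), ⟨by positivity, ?_⟩, ?_⟩
    · have := hsw.length_le
      rw [PySem.Str.len_eq]
      omega
    · have hps : PySem.Str.slice key none (some (p.toList.length : Int)) = p := by
        apply String.toList_inj.mp
        have h1 : (PySem.Str.slice key none (some ((p.toList.length : Nat) : Int))).toList
            = key.toList.take p.toList.length := by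
          simp [PySem.Str.slice]
        rw [h1, ← List.prefix_iff_eq_take.mp hsw]
      rw [pv_mem_pm, hps]
      exact ⟨j, hj, rfl, hp⟩

-- membership in A's assigned set after one rule's pass over env
theorem pv_mem_addFold (env : List (String × String)) (r : String × List String)
    (a0 : PySem.Set String) (x : String) :
    x ∈ env.foldl (fun a kv => if r.2.any (fun p => PySem.Str.startswith kv.1 p) then a.add kv.1 else a) a0
      ↔ x ∈ a0 ∨ ((∃ kv ∈ env, kv.1 = x) ∧ pvM r x = true) := by
  induction env generalizing a0 with
  | nil => simp
  | cons kv env ih =>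
    simp only [List.foldl_cons, List.mem_cons]
    by_cases h : r.2.any (fun p => PySem.Str.startswith kv.1 p) = true
    · rw [if_pos h, ih]
      simp only [PySem.Set.mem_add]
      constructor
      · rintro ((hm | rfl) | h2)
        · exact Or.inl hm
        · exact Or.inr ⟨⟨kv, by simp⟩, h⟩
        · exact Or.inr ⟨⟨h2.1.choose, Or.inr h2.1.choose_spec.1, h2.1.choose_spec.2⟩, h2.2⟩
      · rintro (hm | ⟨⟨kv', hkv', rfl⟩, hM⟩)
        · exact Or.inl (Or.inl hm)
        · rcases hkv' with h1 | h1
          · subst h1; exact Or.inl (Or.inr rfl)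
          · exact Or.inr ⟨⟨kv', h1, rfl⟩, hM⟩
    · rw [if_neg h, ih]
      constructor
      · rintro (hm | h2)
        · exact Or.inl hm
        · exact Or.inr ⟨⟨h2.1.choose, Or.inr h2.1.choose_spec.1, h2.1.choose_spec.2⟩, h2.2⟩
      · rintro (hm | ⟨⟨kv', hkv', rfl⟩, hM⟩)
        · exact Or.inl hm
        · rcases hkv' with h1 | h1
          · subst h1; exact absurd hM h
          · exact Or.inr ⟨⟨kv', h1, rfl⟩, hM⟩

-- membership in A's final assigned set
theorem pv_mem_assigned (rules : List (String × List String)) (env : List (String × String))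
    (a0 : PySem.Set String) (x : String) :
    x ∈ rules.foldl (fun a r => env.foldl (fun a kv => if r.2.any (fun p => PySem.Str.startswith kv.1 p) then a.add kv.1 else a) a) a0
      ↔ x ∈ a0 ∨ ((∃ kv ∈ env, kv.1 = x) ∧ ∃ r ∈ rules, pvM r x = true) := by
  induction rules generalizing a0 with
  | nil => simp
  | cons r rules ih =>
    simp only [List.foldl_cons, ih, pv_mem_addFold, List.mem_cons]
    constructor
    · rintro ((hm | ⟨he, hM⟩) | ⟨he, r', hr', hM⟩)
      · exact Or.inl hm
      · exact Or.inr ⟨he, r, Or.inl rfl, hM⟩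
      · exact Or.inr ⟨he, r', Or.inr hr', hM⟩
    · rintro (hm | ⟨he, r', (rfl | hr'), hM⟩)
      · exact Or.inl (Or.inl hm)
      · exact Or.inl (Or.inr ⟨he, hM⟩)
      · exact Or.inr ⟨he, r', hr', hM⟩

-- A's paired fold splits into independent groups- and assigned-folds
theorem pv_inner_split (env : List (String × String)) (r : String × List String)
    (g0 : PySem.Dict String (PySem.Dict String String)) (a0 : PySem.Set String) :
    env.foldl (fun st kv =>
        if r.2.any (fun p => PySem.Str.startswith kv.1 p) then
          (st.1.modify r.1 PySem.Dict.empty (fun d => d.insert kv.1 kv.2), st.2.add kv.1)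
        else st) (g0, a0)
      = (env.foldl (fun g kv =>
            if r.2.any (fun p => PySem.Str.startswith kv.1 p) then
              g.modify r.1 PySem.Dict.empty (fun d => d.insert kv.1 kv.2)
            else g) g0,
         env.foldl (fun a kv =>
            if r.2.any (fun p => PySem.Str.startswith kv.1 p) then a.add kv.1 else a) a0) := by
  induction env generalizing g0 a0 with
  | nil => rfl
  | cons kv env ih =>
    simp only [List.foldl_cons]
    by_cases h : r.2.any (fun p => PySem.Str.startswith kv.1 p) = true
    · rw [if_pos h, if_pos h, if_pos h, ih]
    · rw [if_neg h, if_neg h, if_neg h, ih]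

theorem pv_pair_split (env : List (String × String)) (rules : List (String × List String))
    (g0 : PySem.Dict String (PySem.Dict String String)) (a0 : PySem.Set String) :
    rules.foldl (fun st r =>
        env.foldl (fun st kv =>
          if r.2.any (fun p => PySem.Str.startswith kv.1 p) then
            (st.1.modify r.1 PySem.Dict.empty (fun d => d.insert kv.1 kv.2), st.2.add kv.1)
          else st) st) (g0, a0)
      = (rules.foldl (fun g r => env.foldl (fun g kv =>
            if r.2.any (fun p => PySem.Str.startswith kv.1 p) then
              g.modify r.1 PySem.Dict.empty (fun d => d.insert kv.1 kv.2)
            else g) g) g0,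
         rules.foldl (fun a r => env.foldl (fun a kv =>
            if r.2.any (fun p => PySem.Str.startswith kv.1 p) then a.add kv.1 else a) a) a0) := by
  induction rules generalizing g0 a0 with
  | nil => rfl
  | cons r rules ih =>
    simp only [List.foldl_cons, pv_inner_split, ih]

-- lookups in the hits dict built over env give pvHits for env keys
theorem pv_hitsdict_getD (env : List (String × String)) (pm : PySem.Dict String (PySem.Set Int))
    (h0 : PySem.Dict String (PySem.Set Int)) (k : String) :
    (env.foldl (fun h kv => h.insert kv.1 (pvHits pm kv.1)) h0).getD k PySem.Set.empty
      = if k ∈ env.map Prod.fst then pvHits pm k else h0.getD k PySem.Set.empty := by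
  induction env generalizing h0 with
  | nil => simp
  | cons kv env ih =>
    simp only [List.foldl_cons, ih, PySem.Dict.getD_insert, List.map_cons, List.mem_cons]
    by_cases h1 : k ∈ env.map Prod.fst <;> by_cases h2 : k = kv.1 <;> simp [h1, h2]

-- the hits-set test equals A's any(startswith) test, for env keys and real rule indices
theorem pv_cond_hits (env : List (String × String)) (rules : List (String × List String))
    (kv : String × String) (hkv : kv ∈ env) (j : Nat) (hj : j < rules.length) :
    ((env.foldl (fun h kv => h.insert kv.1 (pvHits (pvPrefixMap rules) kv.1)) PySem.Dict.empty).getD kv.1 PySem.Set.empty).contains ((j : Int))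
      = rules[j].2.any (fun p => PySem.Str.startswith kv.1 p) := by
  rw [pv_hitsdict_getD, if_pos (List.mem_map.mpr ⟨kv, hkv, rfl⟩)]
  rw [Bool.eq_iff_iff, PySem.Set.contains_iff, pv_mem_hits]
  constructor
  · rintro ⟨j', hj', hcast, hM⟩
    have hjj : j = j' := by exact_mod_cast hcast
    subst hjj
    simpa [pvM] using hM
  · intro h
    exact ⟨j, hj, rfl, by simpa [pvM] using h⟩

-- B's indexed main loop is A's first double loop
theorem pv_main_fold_eq (env : List (String × String)) (rules : List (String × List String)) :
    (PySem.List.enumerate rules 0).foldl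
      (fun g rp => env.foldl (fun (g : PySem.Dict String (PySem.Dict String String)) kv =>
        if ((env.foldl (fun h kv => h.insert kv.1 (pvHits (pvPrefixMap rules) kv.1)) PySem.Dict.empty).getD kv.1 PySem.Set.empty).contains rp.1 then
          g.modify rp.2.1 PySem.Dict.empty (fun d => d.insert kv.1 kv.2)
        else g) g) PySem.Dict.empty
    = rules.foldl (fun g r => env.foldl (fun g kv =>
        if r.2.any (fun p => PySem.Str.startswith kv.1 p) then
          g.modify r.1 PySem.Dict.empty (fun d => d.insert kv.1 kv.2)
        else g) g) PySem.Dict.empty := by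
  have step1 : (PySem.List.enumerate rules 0).foldl
      (fun g rp => env.foldl (fun (g : PySem.Dict String (PySem.Dict String String)) kv =>
        if ((env.foldl (fun h kv => h.insert kv.1 (pvHits (pvPrefixMap rules) kv.1)) PySem.Dict.empty).getD kv.1 PySem.Set.empty).contains rp.1 then
          g.modify rp.2.1 PySem.Dict.empty (fun d => d.insert kv.1 kv.2)
        else g) g) PySem.Dict.empty
      = (PySem.List.enumerate rules 0).foldl
      (fun g rp => env.foldl (fun (g : PySem.Dict String (PySem.Dict String String)) kv =>
        if rp.2.2.any (fun p => PySem.Str.startswith kv.1 p) then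
          g.modify rp.2.1 PySem.Dict.empty (fun d => d.insert kv.1 kv.2)
        else g) g) PySem.Dict.empty := by
    apply PySem.List.foldl_congr_mem
    intro acc rp hrp
    apply PySem.List.foldl_congr_mem
    intro acc2 kv hkv
    obtain ⟨j, hj, rfl⟩ := (PySem.List.mem_enumerate_iff rules 0 rp).mp hrp
    have := pv_cond_hits env rules kv hkv j hj
    simp only [zero_add] at *
    rw [this]
  rw [step1]
  conv_rhs => rw [← PySem.List.map_snd_enumerate rules 0]
  rw [List.foldl_map]

-- B's emptiness test on hits is the negation of A's assigned-membership test
theorem pv_other_fold_eq (env : List (String × String)) (rules : List (String × List String))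
    (g0 : PySem.Dict String (PySem.Dict String String)) :
    env.foldl (fun g kv =>
      if (rules.foldl (fun a r => env.foldl (fun a kv =>
            if r.2.any (fun p => PySem.Str.startswith kv.1 p) then a.add kv.1 else a) a) PySem.Set.empty).contains kv.1 then g
      else g.modify "_OTHER" PySem.Dict.empty (fun d => d.insert kv.1 kv.2)) g0
    = env.foldl (fun g kv =>
      if ((env.foldl (fun h kv => h.insert kv.1 (pvHits (pvPrefixMap rules) kv.1)) PySem.Dict.empty).getD kv.1 PySem.Set.empty).isEmpty then
        g.modify "_OTHER" PySem.Dict.empty (fun d => d.insert kv.1 kv.2)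
      else g) g0 := by
  apply PySem.List.foldl_congr_mem
  intro acc kv hkv
  rw [pv_hitsdict_getD, if_pos (List.mem_map.mpr ⟨kv, hkv, rfl⟩)]
  by_cases hc : ∃ r ∈ rules, pvM r kv.1 = true
  · have h1 : (rules.foldl (fun a r => env.foldl (fun a kv =>
        if r.2.any (fun p => PySem.Str.startswith kv.1 p) then a.add kv.1 else a) a) PySem.Set.empty).contains kv.1 = true :=
      (PySem.Set.contains_iff _ _).mpr ((pv_mem_assigned rules env _ _).mpr (Or.inr ⟨⟨kv, hkv, rfl⟩, hc⟩))
    have h2 : (pvHits (pvPrefixMap rules) kv.1).isEmpty = false := by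
      obtain ⟨r, hr, hM⟩ := hc
      obtain ⟨j, hj, hget⟩ := List.mem_iff_getElem.mp hr
      have hmem : ((j : Int)) ∈ pvHits (pvPrefixMap rules) kv.1 :=
        (pv_mem_hits rules kv.1 _).mpr ⟨j, hj, rfl, by rw [hget]; exact hM⟩
      simpa [List.isEmpty_iff] using List.ne_nil_of_mem hmem
    rw [if_pos h1, h2]
    simp
  · have h1 : (rules.foldl (fun a r => env.foldl (fun a kv =>
        if r.2.any (fun p => PySem.Str.startswith kv.1 p) then a.add kv.1 else a) a) PySem.Set.empty).contains kv.1 = false := by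
      rw [← Bool.not_eq_true, PySem.Set.contains_iff, pv_mem_assigned]
      rintro (hm | ⟨_, hc2⟩)
      · simp [PySem.Set.empty] at hm
      · exact hc hc2
    have h2 : (pvHits (pvPrefixMap rules) kv.1).isEmpty = true := by
      rw [List.isEmpty_iff, List.eq_nil_iff_forall_not_mem]
      intro x hx
      obtain ⟨j, hj, rfl, hM⟩ := (pv_mem_hits rules kv.1 x).mp hx
      exact hc ⟨rules[j], List.getElem_mem hj, hM⟩
    rw [if_neg (by rw [h1]; simp), h2]
    simp

-- ===== VERDICT (by name: the statement is the Claim_ definition above) =====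
theorem group_by_custom_spec : Claim_equal_group_by_custom := by
  intro env rules _
  show group_by_custom env rules = group_by_custom_alt env rules
  unfold group_by_custom group_by_custom_alt
  dsimp only
  rw [pv_pair_split]
  dsimp only
  rw [pv_main_fold_eq, pv_other_fold_eq]
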